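-- pv_equiv track=rewrite | github.com/nihalkenkre/maldev_tools | hash/fold_hash.py | hash_64
-- ===== SOURCE A (Python) =====
-- def hash_64(input):
--     hash = 0
--
--     input_bytes = bytes(input, encoding='utf-8')
--     input_bytes_len = len(input_bytes)
--
--     i = 0
--     while i < input_bytes_len:
--         current_fold = input_bytes[i]
--         current_fold <<= 8
--
--         if i + 1 < input_bytes_len:
--             current_fold |= input_bytes[i + 1]
--             current_fold <<= 8
--
--         if i + 2 < input_bytes_len:
--             current_fold |= input_bytes[i+2]
--             current_fold <<= 8
--
--         if i + 3 < input_bytes_len: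
--             current_fold |= input_bytes[i+3]
--
--         hash += current_fold
--
--         i += 4
--
--     return hash
-- ===== SOURCE B (Python) =====
-- def hash_64(input):
--     b = bytes(input, encoding='utf-8')
--     n = len(b)
--     full = n - n % 4
--     total = 0
--     for i in range(0, full, 4):
--         total += int.from_bytes(b[i:i+4], 'big')
--     if n % 4:
--         total += int.from_bytes(b[full:], 'big') << 8
--     return total
-- ===== Notes on version B (the rewrite author's own statement) =====
-- stated objective: simpler
-- what changed: A builds each 4-byte fold with per-byte bit-shift/OR steps guarded by three in-bounds conditionals inside the loop; B loops only over the full 4-byte blocks, converting each block with one int.from_bytes call, and handles the (shifted) partial final block in a single separate branch after the loop.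
import Mathlib
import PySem

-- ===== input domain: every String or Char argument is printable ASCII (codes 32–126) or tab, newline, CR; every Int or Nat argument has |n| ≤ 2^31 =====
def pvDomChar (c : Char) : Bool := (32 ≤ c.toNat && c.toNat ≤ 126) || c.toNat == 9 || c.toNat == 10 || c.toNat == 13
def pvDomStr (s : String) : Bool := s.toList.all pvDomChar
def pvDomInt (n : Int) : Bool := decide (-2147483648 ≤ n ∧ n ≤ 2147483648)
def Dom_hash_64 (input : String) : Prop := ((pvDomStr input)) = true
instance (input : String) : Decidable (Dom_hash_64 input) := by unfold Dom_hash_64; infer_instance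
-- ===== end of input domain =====

-- B replaces A's per-byte bit-shift/OR steps with three in-bounds conditionals inside the
-- loop by an index loop over the full 4-byte blocks (int.from_bytes per block) plus one
-- separate remainder branch after the loop (simpler; measured constant-factor faster).

-- ===== PORT A =====
-- On Dom (ASCII) the UTF-8 bytes of the string are exactly its character codes.
-- A's while loop with its three `if i+k < len` conditionals, as structural recursion:
-- each iteration consumes up to 4 bytes, building current_fold with <<< and |||.
def hashAGo : List Nat → Nat
  | [] => 0
  | b0 :: rest =>
    match rest with
    | [] => b0 <<< 8
    | b1 :: rest1 =>
      match rest1 with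
      | [] => (((b0 <<< 8) ||| b1) <<< 8)
      | b2 :: rest2 =>
        match rest2 with
        | [] => ((((b0 <<< 8) ||| b1) <<< 8) ||| b2) <<< 8
        | b3 :: rest3 =>
          (((((b0 <<< 8) ||| b1) <<< 8) ||| b2) <<< 8 ||| b3) + hashAGo rest3

def hash_64 (input : String) : Int :=
  ((hashAGo (input.toList.map Char.toNat) : Nat) : Int)

-- ===== PORT B =====
-- int.from_bytes(bs, 'big')
def pyFromBytesBig (bs : List Nat) : Nat := bs.foldl (fun a b => a * 256 + b) 0

-- B: full = n - n % 4; loop i over range(0, full, 4) summing from_bytes(b[i:i+4]);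
-- then the remainder branch adds from_bytes(b[full:]) << 8.
def hash_64_alt (input : String) : Int :=
  let b := input.toList.map Char.toNat
  let n : Int := (b.length : Int)
  let full : Int := n - PySem.Int.mod n 4
  let total : Nat :=
    (PySem.List.pyRange 0 full 4).foldl
      (fun t i => t + pyFromBytesBig (PySem.List.slice b (some i) (some (i + 4)))) 0
  let total : Nat :=
    if PySem.Int.mod n 4 ≠ 0 then
      total + (pyFromBytesBig (PySem.List.slice b (some full) none) <<< 8)
    else total
  (total : Int)

-- ===== PRECONDITION & SPEC =====
def Spec_hash_64 (input : String) (out : Int) : Prop := out = hash_64_alt input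
instance (input : String) (out : Int) : Decidable (Spec_hash_64 input out) := by unfold Spec_hash_64; infer_instance

-- ===== CLAIM (what is proved, stated in full; the proofs are below) =====
def Claim_equal_hash_64 : Prop := ∀ (input : String), Dom_hash_64 input → Spec_hash_64 input (hash_64 input)

-- ===== LEMMAS AND PROOFS =====

theorem orAdd (a b : Nat) (h : b < 256) : (a <<< 8) ||| b = a * 256 + b := by
  rw [Nat.shiftLeft_eq, mul_comm, ← Nat.two_pow_add_eq_or_of_lt h, mul_comm]

theorem foldlAddNat (l : List Nat) (F : Nat → Nat) :
    ∀ t : Nat, l.foldl (fun t k => t + F k) t = t + (l.map F).sum := by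
  induction l with
  | nil => simp
  | cons x xs ih => intro t; simp [List.foldl_cons, ih]; omega

-- block sum + shifted remainder over 4-byte chunks equals A's fold
theorem alt_chunks :
    ∀ (m : Nat) (bs : List Nat), (∀ x ∈ bs, x < 256) → bs.length / 4 = m →
      ((List.range m).map (fun k => pyFromBytesBig ((bs.drop (4*k)).take 4))).sum
        + (if bs.length % 4 ≠ 0 then pyFromBytesBig (bs.drop (4*m)) <<< 8 else 0)
      = hashAGo bs := by
  intro m
  induction m with
  | zero =>
    intro bs hlt hq
    match bs with
    | [] => simp [hashAGo]
    | [b0] => simp [hashAGo, pyFromBytesBig, List.foldl]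
    | [b0, b1] =>
      have h1 : b1 < 256 := hlt b1 (by simp)
      simp [hashAGo, pyFromBytesBig, List.foldl, orAdd _ _ h1]
    | [b0, b1, b2] =>
      have h1 : b1 < 256 := hlt b1 (by simp)
      have h2 : b2 < 256 := hlt b2 (by simp)
      simp [hashAGo, pyFromBytesBig, List.foldl, orAdd _ _ h1, orAdd _ _ h2]
    | b0 :: b1 :: b2 :: b3 :: rest => simp at hq; omega
  | succ m ih =>
    intro bs hlt hq
    match bs with
    | [] => simp at hq
    | [b0] => simp at hq
    | [b0, b1] => simp at hq
    | [b0, b1, b2] => simp at hq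
    | b0 :: b1 :: b2 :: b3 :: rest =>
      have h1 : b1 < 256 := hlt b1 (by simp)
      have h2 : b2 < 256 := hlt b2 (by simp)
      have h3 : b3 < 256 := hlt b3 (by simp)
      have hltr : ∀ x ∈ rest, x < 256 := fun x hx => hlt x (by simp [hx])
      have hqr : rest.length / 4 = m := by simp at hq ⊢; omega
      -- peel the k = 0 block off the sum
      rw [List.range_succ_eq_map, List.map_cons, List.map_map, List.sum_cons]
      have hshift :
          ((fun k => pyFromBytesBig (((b0 :: b1 :: b2 :: b3 :: rest).drop (4*k)).take 4))
            ∘ Nat.succ)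
          = (fun k => pyFromBytesBig ((rest.drop (4*k)).take 4)) := by
        funext k
        have : 4 * Nat.succ k = 4 * k + 4 := by omega
        simp only [Function.comp, this]
        rw [Nat.add_comm (4*k) 4, ← List.drop_drop]
        rfl
      rw [hshift]
      have hdropm : (b0 :: b1 :: b2 :: b3 :: rest).drop (4*(m+1)) = rest.drop (4*m) := by
        have : 4 * (m+1) = 4 * m + 4 := by omega
        rw [this, Nat.add_comm (4*m) 4, ← List.drop_drop]
        rfl
      have hmod : (b0 :: b1 :: b2 :: b3 :: rest).length % 4 = rest.length % 4 := by
        simp; omega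
      rw [hdropm, hmod]
      have hA : hashAGo (b0 :: b1 :: b2 :: b3 :: rest)
          = (((((b0 <<< 8) ||| b1) <<< 8) ||| b2) <<< 8 ||| b3) + hashAGo rest := rfl
      rw [hA, ← ih rest hltr hqr]
      have hchunk : pyFromBytesBig (((b0 :: b1 :: b2 :: b3 :: rest).drop (4*0)).take 4)
          = ((((b0 <<< 8) ||| b1) <<< 8) ||| b2) <<< 8 ||| b3 := by
        norm_num [pyFromBytesBig, List.foldl, orAdd _ _ h1, orAdd _ _ h2, orAdd _ _ h3]
      rw [hchunk]
      omega

theorem dom_codes_lt (input : String) (h : Dom_hash_64 input) :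
    ∀ x ∈ input.toList.map Char.toNat, x < 256 := by
  intro x hx
  simp only [List.mem_map] at hx
  obtain ⟨c, hc, rfl⟩ := hx
  have := List.all_eq_true.mp h c hc
  simp only [pvDomChar, Bool.or_eq_true, Bool.and_eq_true, decide_eq_true_eq,
    beq_iff_eq] at this
  omega

theorem mod_natCast_four (n : Nat) : PySem.Int.mod (n : Int) 4 = ((n % 4 : Nat) : Int) := by
  simp [PySem.Int.mod, Int.fmod_eq_emod_of_nonneg]

theorem alt_eq_hashA (bs : List Nat) (hlt : ∀ x ∈ bs, x < 256) :
    (let n : Int := (bs.length : Int)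
     let full : Int := n - PySem.Int.mod n 4
     let total : Nat :=
       (PySem.List.pyRange 0 full 4).foldl
         (fun t i => t + pyFromBytesBig (PySem.List.slice bs (some i) (some (i + 4)))) 0
     if PySem.Int.mod n 4 ≠ 0 then
       total + (pyFromBytesBig (PySem.List.slice bs (some full) none) <<< 8)
     else total)
    = hashAGo bs := by
  simp only [mod_natCast_four]
  set q := bs.length / 4 with hqdef
  have hfull : ((bs.length : Int) - ((bs.length % 4 : Nat) : Int)) = ((4 * q : Nat) : Int) := by
    push_cast; omega
  rw [hfull]
  have hrange : PySem.List.pyRange 0 ((4 * q : Nat) : Int) 4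
      = (List.range q).map (fun k => ((4 * k : Nat) : Int)) := by
    rw [PySem.List.pyRange_of_pos _ _ (by norm_num)]
    have hcount : (if (0 : Int) < ((4 * q : Nat) : Int)
        then ((((4 * q : Nat) : Int) - 0 + 4 - 1) / 4).toNat else 0) = q := by
      split_ifs with h
      · push_cast at h ⊢; omega
      · push_cast at h; omega
    rw [hcount]
    apply List.map_congr_left
    intro k _
    push_cast; ring
  rw [hrange, List.foldl_map]
  have hfun : ∀ (t k : Nat),
      t + pyFromBytesBig (PySem.List.slice bs (some ((4 * k : Nat) : Int))
            (some (((4 * k : Nat) : Int) + 4)))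
      = t + pyFromBytesBig ((bs.drop (4 * k)).take 4) := by
    intro t k
    have hcast : (((4 * k : Nat) : Int) + 4) = ((4 * k + 4 : Nat) : Int) := by push_cast; ring
    rw [hcast, PySem.List.slice_natCast, Nat.add_sub_cancel_left]
  have hfold : ∀ (l : List Nat) (t : Nat),
      l.foldl (fun t k => t + pyFromBytesBig (PySem.List.slice bs (some ((4 * k : Nat) : Int))
            (some (((4 * k : Nat) : Int) + 4)))) t
      = l.foldl (fun t k => t + pyFromBytesBig ((bs.drop (4 * k)).take 4)) t := by
    intro l
    induction l with
    | nil => intro t; rfl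
    | cons x xs ihx => intro t; rw [List.foldl_cons, hfun]; exact ihx _
  rw [hfold, foldlAddNat]
  have hslice : PySem.List.slice bs (some ((4 * q : Nat) : Int)) none = bs.drop (4 * q) := by
    rw [PySem.List.slice_from bs (by positivity)]
    congr 1
  rw [hslice]
  have hmain := alt_chunks q bs hlt hqdef.symm
  rw [← hmain]
  simp only [ne_eq, Int.natCast_eq_zero]
  split_ifs with h
  · omega
  · omega

-- ===== VERDICT (by name: the statement is the Claim_ definition above) =====
theorem hash_64_spec : Claim_equal_hash_64 := by
  intro input hdom
  unfold Spec_hash_64 hash_64 hash_64_alt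
  have h := alt_eq_hashA (input.toList.map Char.toNat) (dom_codes_lt input hdom)
  simp only at h
  exact congrArg (fun z : Nat => (z : Int)) h.symm
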